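-- pv_equiv track=rewrite | github.com/Hashtae9/PythonCodingTest | weekly_study/KTCodeMaster/KT7256.py | ebun
-- ===== SOURCE A (Python) =====
-- def ebun(d, g):
--     left, right = 1, max(d)
--     result = 0
--
--     while left <= right:
--         mid = (left + right) // 2
--
--         count = 0
--         for i in d:
--             count+=min(i, mid)
--
--         if count<=g:
--             result = mid
--             left = mid + 1
--         else:
--             right = mid - 1
--
--     return result
-- ===== SOURCE B (Python) =====
-- def ebun(d, g):
--     # sort + running prefix sum: solve the affine equation on each segment directly
--     s = sorted(d)
--     n = len(s)
--     M = s[-1]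
--     if M < 1:
--         return 0
--     best, p = 0, 0
--     for j in range(n):
--         lo = max(s[j - 1], 1) if j > 0 else 1
--         hi = s[j] - 1
--         if lo <= hi:
--             cand = (g - p) // (n - j)
--             if lo <= cand:
--                 best = max(best, min(cand, hi))
--         p += s[j]
--     return M if p <= g else best
-- ===== Notes on version B (the rewrite author's own statement) =====
-- stated objective: faster
-- what changed: Replaces A's binary search (recomputing sum(min(d_i,mid)) over all of d per probe) by sort + one running-prefix-sum pass that solves the affine equation p + (n-j)*mid <= g directly on each segment between consecutive sorted values.
-- outside the precondition, e.g. on ebun([], 0): A raises ValueError, B raises IndexError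
import Mathlib
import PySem

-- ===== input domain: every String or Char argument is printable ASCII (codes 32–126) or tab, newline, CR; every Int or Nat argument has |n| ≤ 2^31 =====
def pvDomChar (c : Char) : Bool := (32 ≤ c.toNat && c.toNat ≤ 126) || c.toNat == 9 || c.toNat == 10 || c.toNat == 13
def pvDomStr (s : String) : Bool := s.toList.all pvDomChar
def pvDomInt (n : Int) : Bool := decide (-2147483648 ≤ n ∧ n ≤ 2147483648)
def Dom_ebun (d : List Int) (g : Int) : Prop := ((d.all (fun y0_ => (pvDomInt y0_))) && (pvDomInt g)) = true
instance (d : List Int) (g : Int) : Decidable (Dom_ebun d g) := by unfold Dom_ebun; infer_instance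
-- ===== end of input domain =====

-- B replaces A's binary search over the answer by sort + running prefix sum, solving the
-- affine equation sum(min(d_i,mid)) = p + (n-j)*mid directly on each segment of sorted values.

-- ===== PORT A =====
-- the while-loop of A: state (left, right, result)
def ebunLoop (d : List Int) (g left right result : Int) : Int :=
  if h : left ≤ right then
    let mid := PySem.Int.floordiv (left + right) 2
    let count := d.foldl (fun c i => c + min i mid) 0
    if count ≤ g then ebunLoop d g (mid + 1) right mid
    else ebunLoop d g left (mid - 1) result
  else result
termination_by (right + 1 - left).toNat
decreasing_by
  · have hb := PySem.Int.floordiv_two_mid_bounds h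
    generalize hm : PySem.Int.floordiv (left + right) 2 = m at hb ⊢
    omega
  · have hb := PySem.Int.floordiv_two_mid_bounds h
    generalize hm : PySem.Int.floordiv (left + right) 2 = m at hb ⊢
    omega

def ebun (d : List Int) (g : Int) : Int :=
  match PySem.List.max? d (fun y => y) with   -- max(d); none = ValueError on [] (excluded by Pre_)
  | none => 0
  | some r => ebunLoop d g 1 r 0

-- ===== PORT B =====
-- the body of Source B's for-loop over j in range(n); state bp = (best, p)
def ebunAltStep (s : List Int) (g n : Int) (bp : Int × Int) (j : Int) : Int × Int :=
  let lo := if 0 < j then max (PySem.List.pyGetD s (j - 1) 0) 1 else 1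
  let hi := PySem.List.pyGetD s j 0 - 1
  let best :=
    if lo ≤ hi then
      let cand := PySem.Int.floordiv (g - bp.2) (n - j)
      if lo ≤ cand then max bp.1 (min cand hi) else bp.1
    else bp.1
  (best, bp.2 + PySem.List.pyGetD s j 0)

-- transliteration of Source B; s[j] / s[j-1] / s[-1] are always in range, ported via pyGetD / pyGet?
def ebun_alt (d : List Int) (g : Int) : Int :=
  let s := PySem.List.sorted d (fun y => y) false
  let n : Int := s.length
  match PySem.List.pyGet? s (-1) with          -- s[-1]; none = IndexError on [] (excluded by Pre_)
  | none => 0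
  | some M =>
    if M < 1 then 0
    else
      let st := (PySem.List.pyRange 0 n 1).foldl (ebunAltStep s g n) ((0 : Int), (0 : Int))
      if st.2 ≤ g then M else st.1

-- ===== PRECONDITION & SPEC =====
-- Pre_ excludes only d = [], on which A raises ValueError (max of empty list)
def Pre_ebun (d : List Int) (g : Int) : Prop := d ≠ []
instance (d : List Int) (g : Int) : Decidable (Pre_ebun d g) := by unfold Pre_ebun; infer_instance
def pvWitness_ebun : List Int × Int := ([2, 5, 3], 6)

def Spec_ebun (d : List Int) (g : Int) (out : Int) : Prop := out = ebun_alt d g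
instance (d : List Int) (g : Int) (out : Int) : Decidable (Spec_ebun d g out) := by unfold Spec_ebun; infer_instance

-- ===== CLAIM (what is proved, stated in full; the proofs are below) =====
def Claim_equal_ebun : Prop := ∀ (d : List Int) (g : Int), Dom_ebun d g → Pre_ebun d g → Spec_ebun d g (ebun d g)

-- ===== LEMMAS AND PROOFS =====

-- f(m) = sum(min(i, m) for i in d), the quantity both programs compare with g
def pvF (d : List Int) (m : Int) : Int := d.foldl (fun c i => c + min i m) 0

-- m is a feasible answer
def pvValid (d : List Int) (g M m : Int) : Prop := 1 ≤ m ∧ m ≤ M ∧ pvF d m ≤ g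

-- r is THE answer: 0 when nothing is feasible, else the greatest feasible m
def pvIsAnswer (d : List Int) (g M r : Int) : Prop :=
  (r = 0 ∧ ∀ m, ¬ pvValid d g M m) ∨
  (pvValid d g M r ∧ ∀ m, pvValid d g M m → m ≤ r)

lemma pvIsAnswer_unique {d : List Int} {g M r r' : Int}
    (h : pvIsAnswer d g M r) (h' : pvIsAnswer d g M r') : r = r' := by
  rcases h with ⟨rfl, hno⟩ | ⟨hv, hmax⟩
  · rcases h' with ⟨rfl, _⟩ | ⟨hv', _⟩
    · rfl
    · exact absurd hv' (hno r')
  · rcases h' with ⟨rfl, hno'⟩ | ⟨hv', hmax'⟩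
    · exact absurd hv (hno' r)
    · exact le_antisymm (hmax' r hv) (hmax r' hv')

lemma pvF_acc (d : List Int) (m c : Int) :
    d.foldl (fun c i => c + min i m) c = c + pvF d m := by
  induction d generalizing c with
  | nil => simp [pvF]
  | cons x t ih => simp only [pvF, List.foldl_cons]; rw [ih, ih]; ring

lemma pvF_cons (x : Int) (d : List Int) (m : Int) :
    pvF (x :: d) m = min x m + pvF d m := by
  simp only [pvF, List.foldl_cons]
  rw [pvF_acc]
  simp [pvF]

lemma pvF_mono (d : List Int) {m m' : Int} (h : m ≤ m') : pvF d m ≤ pvF d m' := by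
  induction d with
  | nil => simp [pvF]
  | cons x t ih =>
    rw [pvF_cons, pvF_cons]
    have : min x m ≤ min x m' := by omega
    omega

lemma pvF_eq_sum (d : List Int) (m : Int) : pvF d m = (d.map (fun i => min i m)).sum := by
  induction d with
  | nil => simp [pvF]
  | cons x t ih => rw [pvF_cons, List.map_cons, List.sum_cons, ih]

lemma pvF_perm {d e : List Int} (h : d.Perm e) (m : Int) : pvF d m = pvF e m := by
  rw [pvF_eq_sum, pvF_eq_sum]
  exact (h.map _).sum_eq

lemma pvF_of_all_le {d : List Int} {M : Int} (h : ∀ x ∈ d, x ≤ M) : pvF d M = d.sum := by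
  induction d with
  | nil => simp [pvF]
  | cons x t ih =>
    rw [pvF_cons, List.sum_cons, ih (fun y hy => h y (List.mem_cons_of_mem _ hy))]
    have := h x (List.mem_cons_self)
    omega

-- on a segment where exactly the first j (sorted) values are ≤ m, f is affine in m
lemma pvF_segment (s : List Int) (j : Nat) (m : Int) (hj : j ≤ s.length)
    (hlow : ∀ i (hi : i < s.length), i < j → s[i] ≤ m)
    (hhigh : ∀ i (hi : i < s.length), j ≤ i → m ≤ s[i]) :
    pvF s m = (s.take j).sum + ((s.length : Int) - (j : Int)) * m := by
  induction s generalizing j with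
  | nil =>
    have hj0 : j = 0 := by simpa using hj
    subst hj0; simp [pvF]
  | cons x t ih =>
    cases j with
    | zero =>
      have hx : m ≤ x := hhigh 0 (by simp) (by omega)
      rw [pvF_cons]
      have := ih 0 (by omega) (by omega)
        (fun i hi _ => by
          have := hhigh (i + 1) (by simpa using Nat.succ_lt_succ hi) (by omega)
          simpa using this)
      rw [this]
      have hmin : min x m = m := by omega
      rw [hmin]
      simp only [List.take_zero, List.sum_nil, List.length_cons]
      push_cast
      ring
    | succ k =>
      have hx : x ≤ m := hlow 0 (by simp) (by omega)
      rw [pvF_cons]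
      have := ih k (by simpa using hj)
        (fun i hi hik => by
          have := hlow (i + 1) (by simpa using Nat.succ_lt_succ hi) (by omega)
          simpa using this)
        (fun i hi hik => by
          have := hhigh (i + 1) (by simpa using Nat.succ_lt_succ hi) (by omega)
          simpa using this)
      rw [this]
      have hmin : min x m = x := by omega
      rw [hmin]
      simp only [List.take_succ_cons, List.sum_cons, List.length_cons]
      push_cast
      ring

-- sortedness: elementwise monotone access
lemma pw_getElem_le {s : List Int} (hpw : s.Pairwise (· ≤ ·)) {i k : Nat}
    (hik : i ≤ k) (hk : k < s.length) : s[i]'(by omega) ≤ s[k] := by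
  rcases Nat.lt_or_ge i k with h | h
  · exact (List.pairwise_iff_getElem.mp hpw) i k (by omega) hk h
  · have : i = k := by omega
    subst this; exact le_refl _

-- ===== correctness of port A's loop =====
lemma ebunLoop_exit {d : List Int} {g M left right result : Int}
    (hL1 : 1 ≤ left) (hRM : right ≤ M) (hlr : left = right + 1) (hres : result = left - 1)
    (hgood : left = 1 ∨ pvF d (left - 1) ≤ g)
    (hbad : right = M ∨ g < pvF d (right + 1)) :
    pvIsAnswer d g M result := by
  rcases Int.lt_or_le result 1 with hr0 | hr1
  · -- result = 0, left = 1, right = 0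
    have hres0 : result = 0 := by omega
    left
    refine ⟨hres0, fun m hm => ?_⟩
    obtain ⟨hm1, hmM, hmg⟩ := hm
    rcases hbad with hMr | hbig
    · omega
    · have : right + 1 ≤ m := by omega
      have := pvF_mono d this
      omega
  · right
    have hgoodr : pvF d result ≤ g := by
      rcases hgood with h1 | h2
      · omega
      · rw [hres]; exact h2
    refine ⟨⟨hr1, by omega, hgoodr⟩, fun m hm => ?_⟩
    obtain ⟨hm1, hmM, hmg⟩ := hm
    by_contra hcon
    push_neg at hcon
    rcases hbad with hMr | hbig
    · omega
    · have : right + 1 ≤ m := by omega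
      have := pvF_mono d this
      omega

lemma ebunLoop_correct (d : List Int) (g M : Int) :
    ∀ (k : Nat) (left right result : Int), (right + 1 - left).toNat ≤ k →
    1 ≤ left → right ≤ M → left ≤ right + 1 → result = left - 1 →
    (left = 1 ∨ pvF d (left - 1) ≤ g) →
    (right = M ∨ g < pvF d (right + 1)) →
    pvIsAnswer d g M (ebunLoop d g left right result) := by
  intro k
  induction k with
  | zero =>
    intro left right result hk hL1 hRM hlr hres hgood hbad
    have hex : ¬ (left ≤ right) := by omega
    rw [ebunLoop, dif_neg hex]
    exact ebunLoop_exit hL1 hRM (by omega) hres hgood hbad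
  | succ k ih =>
    intro left right result hk hL1 hRM hlr hres hgood hbad
    by_cases h : left ≤ right
    · rw [ebunLoop, dif_pos h]
      have hb := PySem.Int.floordiv_two_mid_bounds h
      simp only
      generalize hm : PySem.Int.floordiv (left + right) 2 = mid at hb ⊢
      have hcnt : d.foldl (fun c i => c + min i mid) 0 = pvF d mid := rfl
      rw [hcnt]
      by_cases hc : pvF d mid ≤ g
      · rw [if_pos hc]
        exact ih (mid + 1) right mid (by omega) (by omega) hRM (by omega) (by omega)
          (Or.inr (by simpa using hc)) hbad
      · rw [if_neg hc]
        exact ih left (mid - 1) result (by omega) hL1 (by omega) (by omega) hres hgood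
          (Or.inr (by rw [show mid - 1 + 1 = mid from by ring]; omega))
    · rw [ebunLoop, dif_neg h]
      exact ebunLoop_exit hL1 hRM (by omega) hres hgood hbad

lemma ebun_isAnswer (d : List Int) (g M : Int)
    (hmax : PySem.List.max? d (fun y => y) = some M) :
    pvIsAnswer d g M (ebun d g) := by
  unfold ebun
  rw [hmax]
  show pvIsAnswer d g M (ebunLoop d g 1 M 0)
  rcases Int.lt_or_le M 1 with hM | hM
  · rw [ebunLoop, dif_neg (by omega)]
    left
    exact ⟨rfl, fun m hm => by obtain ⟨h1, h2, _⟩ := hm; omega⟩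
  · exact ebunLoop_correct d g M (M + 1 - 1).toNat 1 M 0 (by omega) (by omega) (le_refl M)
      (by omega) (by omega) (Or.inl rfl) (Or.inl rfl)

-- ===== correctness of port B's loop =====

-- the upper boundary of the region of mids already processed after j iterations
def pvL (s : List Int) (j : Int) : Int := if j ≤ 0 then 0 else s.getD (j - 1).toNat 0 - 1

-- invariant for `best` after j iterations of Source B's loop
def pvQ (d : List Int) (g M : Int) (s : List Int) (j best : Int) : Prop :=
  0 ≤ best ∧ (1 ≤ best → pvValid d g M best ∧ best ≤ pvL s j) ∧
  (∀ m, pvValid d g M m → m ≤ pvL s j → m ≤ best)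

lemma pw_getD_le {s : List Int} (hpw : s.Pairwise (· ≤ ·)) {i k : Nat}
    (hik : i ≤ k) (hk : k < s.length) : s.getD i 0 ≤ s.getD k 0 := by
  rw [List.getD_eq_getElem s 0 (by omega : i < s.length), List.getD_eq_getElem s 0 hk]
  exact pw_getElem_le hpw hik hk

lemma pw_getD_le_getLast {s : List Int} (hpw : s.Pairwise (· ≤ ·)) (hne : s ≠ []) {i : Nat}
    (hi : i < s.length) : s.getD i 0 ≤ s.getLast hne := by
  have hlen : 0 < s.length := List.length_pos_of_ne_nil hne
  have := pw_getD_le hpw (Nat.le_sub_one_of_lt hi) (by omega : s.length - 1 < s.length)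
  rwa [List.getD_eq_getElem s 0 (by omega : s.length - 1 < s.length), ← List.getLast_eq_getElem] at this

lemma pw_mem_le_getLast {s : List Int} (hpw : s.Pairwise (· ≤ ·)) (hne : s ≠ []) {x : Int}
    (hx : x ∈ s) : x ≤ s.getLast hne := by
  obtain ⟨i, hi, rfl⟩ := List.mem_iff_getElem.mp hx
  rw [← List.getD_eq_getElem s 0 hi]
  exact pw_getD_le_getLast hpw hne hi

lemma pyGetD_getD (s : List Int) (i : Int) (h0 : 0 ≤ i) (h1 : i < (s.length : Int)) :
    PySem.List.pyGetD s i 0 = s.getD i.toNat 0 := by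
  rw [PySem.List.pyGetD_eq_getElem s 0 h0 h1, List.getD_eq_getElem s 0 (by omega)]

-- core of the per-iteration argument, the update of `best` abstracted over `lo`
lemma pvQ_step_core (d : List Int) (g M : Int) (s : List Int)
    (hperm : s.Perm d) (hpw : s.Pairwise (· ≤ ·)) (hne : s ≠ [])
    (hlast : s.getLast hne = M)
    (j : Int) (h0 : 0 ≤ j) (hjlt : j < (s.length : Int))
    (best p : Int) (hp : p = (s.take j.toNat).sum) (hQ : pvQ d g M s j best)
    (lo : Int) (hlo1 : 1 ≤ lo)
    (hloseg : 0 < j → s.getD (j.toNat - 1) 0 ≤ lo)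
    (hloL : ∀ m, 1 ≤ m → pvL s j < m → lo ≤ m) :
    pvQ d g M s (j + 1)
      (if lo ≤ s.getD j.toNat 0 - 1 then
        (if lo ≤ PySem.Int.floordiv (g - p) ((s.length : Int) - j) then
          max best (min (PySem.Int.floordiv (g - p) ((s.length : Int) - j)) (s.getD j.toNat 0 - 1))
        else best)
      else best) := by
  obtain ⟨hb0, hbv, hbmax⟩ := hQ
  have hjn : j.toNat < s.length := by omega
  have hjcast : ((j.toNat : Nat) : Int) = j := Int.toNat_of_nonneg h0
  have hlen : 0 < s.length := by omega
  have hsdM : s.getD j.toNat 0 ≤ M := by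
    rw [← hlast]; exact pw_getD_le_getLast hpw hne hjn
  -- f is affine on the segment [lo, s[j]-1]
  have K1 : ∀ m : Int, lo ≤ m → m ≤ s.getD j.toNat 0 - 1 →
      pvF d m = p + ((s.length : Int) - j) * m := by
    intro m hlom hmhi
    have hseg := pvF_segment s j.toNat m (le_of_lt hjn)
      (fun i hi hij => by
        have hj0 : 0 < j := by omega
        have h1 : s.getD i 0 ≤ s.getD (j.toNat - 1) 0 := pw_getD_le hpw (by omega) (by omega)
        rw [List.getD_eq_getElem s 0 hi] at h1
        have := hloseg hj0
        omega)
      (fun i hi hij => by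
        have h1 : s.getD j.toNat 0 ≤ s.getD i 0 := pw_getD_le hpw hij hi
        rw [List.getD_eq_getElem s 0 hi] at h1
        omega)
    rw [← pvF_perm hperm m, hseg, hp, hjcast]
  have hnj : (0:Int) < (s.length : Int) - j := by omega
  -- the floor-division bracket
  have K2 : ∀ m : Int, m ≤ PySem.Int.floordiv (g - p) ((s.length : Int) - j) ↔
      p + ((s.length : Int) - j) * m ≤ g := by
    intro m
    rw [PySem.Int.le_floordiv_iff_mul_le hnj]
    constructor <;> intro h <;> nlinarith [mul_comm m ((s.length : Int) - j)]
  -- feasibility on the segment is exactly the bracket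
  have KV : ∀ m : Int, lo ≤ m → m ≤ s.getD j.toNat 0 - 1 →
      (pvValid d g M m ↔ m ≤ PySem.Int.floordiv (g - p) ((s.length : Int) - j)) := by
    intro m hlom hmhi
    constructor
    · intro ⟨_, _, hFm⟩
      rw [K2, ← K1 m hlom hmhi]; exact hFm
    · intro hcand
      refine ⟨by omega, by omega, ?_⟩
      rw [K1 m hlom hmhi, ← K2]; exact hcand
  have hL1 : pvL s (j + 1) = s.getD j.toNat 0 - 1 := by
    unfold pvL
    rw [if_neg (by omega)]
    rw [show j + 1 - 1 = j from by ring]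
  have hL0 : j ≤ 0 → pvL s j = 0 := fun h => by unfold pvL; rw [if_pos h]
  have hLle : 0 < j → pvL s j ≤ s.getD j.toNat 0 - 1 := by
    intro hj0
    unfold pvL
    rw [if_neg (by omega)]
    have := pw_getD_le hpw (by omega : (j - 1).toNat ≤ j.toNat) hjn
    omega
  -- the three components of pvQ, shared by all branches for best-kept cases
  have keepv : 1 ≤ best → pvValid d g M best ∧ best ≤ pvL s (j + 1) := by
    intro h1
    obtain ⟨hv, hb⟩ := hbv h1
    refine ⟨hv, ?_⟩
    rw [hL1]
    rcases Int.lt_or_le 0 j with hj0 | hj0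
    · have := hLle hj0; omega
    · have := hL0 hj0; omega
  split_ifs with hseg hcand
  · -- segment nonempty and feasible up to cand
    refine ⟨le_trans hb0 (le_max_left _ _), ?_, ?_⟩
    · intro h1
      rcases max_cases best (min (PySem.Int.floordiv (g - p) ((s.length : Int) - j)) (s.getD j.toNat 0 - 1)) with ⟨heq, _⟩ | ⟨heq, _⟩ <;> rw [heq] <;> rw [heq] at h1
      · exact keepv h1
      · have hlov : lo ≤ min (PySem.Int.floordiv (g - p) ((s.length : Int) - j)) (s.getD j.toNat 0 - 1) := by omega
        have hvhi : min (PySem.Int.floordiv (g - p) ((s.length : Int) - j)) (s.getD j.toNat 0 - 1) ≤ s.getD j.toNat 0 - 1 := by omega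
        refine ⟨(KV _ hlov hvhi).mpr (by omega), ?_⟩
        rw [hL1]; omega
    · intro m hm hmL
      rw [hL1] at hmL
      rcases Int.lt_or_le (pvL s j) m with hmj | hmj
      · have hlom : lo ≤ m := hloL m hm.1 hmj
        have hmc : m ≤ PySem.Int.floordiv (g - p) ((s.length : Int) - j) := (KV m hlom hmL).mp hm
        have : m ≤ min (PySem.Int.floordiv (g - p) ((s.length : Int) - j)) (s.getD j.toNat 0 - 1) := by omega
        exact le_trans this (le_max_right _ _)
      · exact le_trans (hbmax m hm hmj) (le_max_left _ _)
  · -- segment nonempty but cand below it: nothing feasible here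
    refine ⟨hb0, keepv, ?_⟩
    intro m hm hmL
    rw [hL1] at hmL
    rcases Int.lt_or_le (pvL s j) m with hmj | hmj
    · have hlom : lo ≤ m := hloL m hm.1 hmj
      have hmc : m ≤ PySem.Int.floordiv (g - p) ((s.length : Int) - j) := (KV m hlom hmL).mp hm
      omega
    · exact hbmax m hm hmj
  · -- empty segment
    refine ⟨hb0, keepv, ?_⟩
    intro m hm hmL
    rw [hL1] at hmL
    rcases Int.lt_or_le (pvL s j) m with hmj | hmj
    · have hlom : lo ≤ m := hloL m hm.1 hmj
      omega
    · exact hbmax m hm hmj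

lemma pvQ_step (d : List Int) (g M : Int) (s : List Int)
    (hperm : s.Perm d) (hpw : s.Pairwise (· ≤ ·)) (hne : s ≠ [])
    (hlast : s.getLast hne = M)
    (j : Int) (h0 : 0 ≤ j) (hjlt : j < (s.length : Int))
    (best p : Int) (hp : p = (s.take j.toNat).sum) (hQ : pvQ d g M s j best) :
    pvQ d g M s (j + 1) (ebunAltStep s g (s.length : Int) (best, p) j).1 := by
  have hjn : j.toNat < s.length := by omega
  have hsj : PySem.List.pyGetD s j 0 = s.getD j.toNat 0 := pyGetD_getD s j h0 hjlt
  rcases Int.lt_or_le 0 j with hj0 | hj0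
  · have hsj1 : PySem.List.pyGetD s (j - 1) 0 = s.getD (j.toNat - 1) 0 := by
      rw [pyGetD_getD s (j - 1) (by omega) (by omega), show (j - 1).toNat = j.toNat - 1 from by omega]
    simp only [ebunAltStep, if_pos hj0, hsj, hsj1]
    exact pvQ_step_core d g M s hperm hpw hne hlast j h0 hjlt best p hp hQ
      (max (s.getD (j.toNat - 1) 0) 1) (le_max_right _ _)
      (fun _ => le_max_left _ _)
      (fun m hm hmL => by
        have hLj : pvL s j = s.getD (j.toNat - 1) 0 - 1 := by
          unfold pvL
          rw [if_neg (by omega)]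
          congr 2
          omega
        rw [hLj] at hmL
        omega)
  · have hj00 : j = 0 := by omega
    simp only [ebunAltStep, if_neg (by omega : ¬ (0:Int) < j), hsj]
    exact pvQ_step_core d g M s hperm hpw hne hlast j h0 hjlt best p hp hQ
      1 (le_refl 1)
      (fun hc => absurd hc (by omega))
      (fun m hm _ => hm)

lemma ebunAlt_loop (d : List Int) (g M : Int) (s : List Int)
    (hperm : s.Perm d) (hpw : s.Pairwise (· ≤ ·)) (hne : s ≠ [])
    (hlast : s.getLast hne = M) :
    ∀ (k : Nat) (j best p : Int), ((s.length : Int) - j).toNat ≤ k →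
    0 ≤ j → j ≤ (s.length : Int) →
    p = (s.take j.toNat).sum → pvQ d g M s j best →
    (((PySem.List.pyRange j (s.length : Int) 1).foldl (ebunAltStep s g (s.length : Int)) (best, p)).2 = s.sum ∧
     pvQ d g M s (s.length : Int)
       (((PySem.List.pyRange j (s.length : Int) 1).foldl (ebunAltStep s g (s.length : Int)) (best, p)).1)) := by
  intro k
  induction k with
  | zero =>
    intro j best p hk h0 hjle hp hQ
    have hjn : j = (s.length : Int) := by omega
    subst hjn
    rw [PySem.List.pyRange_one_eq_nil (le_refl _), List.foldl_nil]
    refine ⟨?_, hQ⟩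
    simp only [hp]
    rw [show ((s.length : Int)).toNat = s.length from by omega, List.take_length]
  | succ k ih =>
    intro j best p hk h0 hjle hp hQ
    rcases Int.lt_or_le j (s.length : Int) with hjlt | hjge
    · rw [PySem.List.pyRange_one_cons hjlt, List.foldl_cons]
      have hjn : j.toNat < s.length := by omega
      have hsj : PySem.List.pyGetD s j 0 = s.getD j.toNat 0 := pyGetD_getD s j h0 hjlt
      have hsnd : (ebunAltStep s g (s.length : Int) (best, p) j).2 = p + s.getD j.toNat 0 := by
        simp only [ebunAltStep, hsj]
      have hp' : (ebunAltStep s g (s.length : Int) (best, p) j).2 = (s.take (j + 1).toNat).sum := by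
        rw [hsnd, hp, show (j + 1).toNat = j.toNat + 1 from by omega,
            List.sum_take_succ s j.toNat hjn, List.getD_eq_getElem s 0 hjn]
      have hQ' : pvQ d g M s (j + 1) (ebunAltStep s g (s.length : Int) (best, p) j).1 :=
        pvQ_step d g M s hperm hpw hne hlast j h0 hjlt best p hp hQ
      have := ih (j + 1) (ebunAltStep s g (s.length : Int) (best, p) j).1
        (ebunAltStep s g (s.length : Int) (best, p) j).2
        (by omega) (by omega) (by omega) hp' hQ'
      simpa using this
    · have hjn : j = (s.length : Int) := by omega
      subst hjn
      rw [PySem.List.pyRange_one_eq_nil (le_refl _), List.foldl_nil]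
      refine ⟨?_, hQ⟩
      simp only [hp]
      rw [show ((s.length : Int)).toNat = s.length from by omega, List.take_length]

lemma ebunAlt_isAnswer (d : List Int) (g M : Int) (hne : d ≠ [])
    (hmax : PySem.List.max? d (fun y => y) = some M) :
    pvIsAnswer d g M (ebun_alt d g) := by
  have hMmem : M ∈ d := PySem.List.max?_mem hmax
  have hMmax : ∀ y ∈ d, y ≤ M := PySem.List.max?_isMax hmax
  have hperm : (PySem.List.sorted d (fun y => y) false).Perm d := PySem.List.sorted_perm d _ _
  have hpw : (PySem.List.sorted d (fun y => y) false).Pairwise (· ≤ ·) :=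
    PySem.List.sorted_pairwise d _
  have hsne : PySem.List.sorted d (fun y => y) false ≠ [] := by
    intro h
    have hl := hperm.length_eq
    rw [h] at hl
    exact hne (by simpa using hl.symm)
  have hlastM : (PySem.List.sorted d (fun y => y) false).getLast hsne = M := by
    apply le_antisymm
    · exact hMmax _ (hperm.mem_iff.mp (List.getLast_mem hsne))
    · exact pw_mem_le_getLast hpw hsne (hperm.mem_iff.mpr hMmem)
  have hget : PySem.List.pyGet? (PySem.List.sorted d (fun y => y) false) (-1) = some M := by
    rw [PySem.List.pyGet?_neg_one, List.getLast?_eq_getLast hsne, hlastM]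
  have hlen : 0 < (PySem.List.sorted d (fun y => y) false).length :=
    List.length_pos_of_ne_nil hsne
  simp only [ebun_alt, hget]
  rcases Int.lt_or_le M 1 with hM | hM1
  · rw [if_pos hM]
    left
    exact ⟨rfl, fun m hm => by obtain ⟨h1, h2, _⟩ := hm; omega⟩
  · rw [if_neg (by omega)]
    -- run the loop from j = 0
    have hQ0 : pvQ d g M (PySem.List.sorted d (fun y => y) false) 0 0 := by
      refine ⟨le_refl 0, by omega, fun m hm hmL => ?_⟩
      have : pvL (PySem.List.sorted d (fun y => y) false) 0 = 0 := by
        unfold pvL; rw [if_pos (le_refl 0)]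
      omega
    obtain ⟨hsum, hQn⟩ := ebunAlt_loop d g M (PySem.List.sorted d (fun y => y) false)
      hperm hpw hsne hlastM ((PySem.List.sorted d (fun y => y) false).length) 0 0 0
      (by omega) (le_refl 0) (by omega) (by simp) hQ0
    obtain ⟨hb0, hbv, hbmax⟩ := hQn
    have hFd : pvF d M = (PySem.List.sorted d (fun y => y) false).sum := by
      rw [pvF_of_all_le hMmax, hperm.sum_eq]
    have hLn : pvL (PySem.List.sorted d (fun y => y) false)
        ((PySem.List.sorted d (fun y => y) false).length : Int) = M - 1 := by
      unfold pvL
      rw [if_neg (by omega)]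
      rw [show (((PySem.List.sorted d (fun y => y) false).length : Int) - 1).toNat
            = (PySem.List.sorted d (fun y => y) false).length - 1 from by omega,
          List.getD_eq_getElem _ 0 (by omega), ← List.getLast_eq_getElem hsne, hlastM]
    split_ifs with hg
    · -- p = sum(s) ≤ g: answer is M itself
      right
      refine ⟨⟨hM1, le_refl M, by rw [hFd, ← hsum]; exact hg⟩, fun m hm => hm.2.1⟩
    · -- M itself infeasible: the loop's best is the answer
      rw [hsum] at hg
      have hMbad : ¬ pvF d M ≤ g := by rw [hFd]; exact hg
      have hmle : ∀ m, pvValid d g M m → m ≤ pvL (PySem.List.sorted d (fun y => y) false)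
          ((PySem.List.sorted d (fun y => y) false).length : Int) := by
        intro m hm
        rw [hLn]
        rcases Int.lt_or_le m M with h | h
        · omega
        · exfalso
          have : m = M := le_antisymm hm.2.1 h
          exact hMbad (this ▸ hm.2.2)
      rcases Int.lt_or_le ((((PySem.List.pyRange 0 ((PySem.List.sorted d (fun y => y) false).length : Int) 1)).foldl
          (ebunAltStep (PySem.List.sorted d (fun y => y) false) g ((PySem.List.sorted d (fun y => y) false).length : Int)) ((0:Int), (0:Int))).1) 1 with hb1 | hb1
      · left
        refine ⟨by omega, fun m hm => ?_⟩
        have h1 := hbmax m hm (hmle m hm)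
        have := hm.1
        omega
      · right
        exact ⟨(hbv hb1).1, fun m hm => hbmax m hm (hmle m hm)⟩

-- ===== VERDICT (by name: the statement is the Claim_ definition above) =====
theorem ebun_spec : Claim_equal_ebun := by
  intro d g _hdom hpre
  unfold Spec_ebun
  obtain ⟨M, hmax⟩ : ∃ M, PySem.List.max? d (fun y => y) = some M := by
    cases hm : PySem.List.max? d (fun y => y) with
    | none => exact absurd ((PySem.List.max?_eq_none_iff d (fun y => y)).mp hm) hpre
    | some M => exact ⟨M, rfl⟩
  exact pvIsAnswer_unique (ebun_isAnswer d g M hmax) (ebunAlt_isAnswer d g M hpre hmax)
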